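-- pv_equiv track=rewrite | github.com/NaamaMika/boss-sniffer | step2_manager.py | indexs_countries
-- ===== SOURCE A (Python) =====
-- def indexs_countries(update_html_code):
--     """Find two indexs that will help set the relevant information of the countries
--     :param update_html_code: html code
--     :return: indexs
--     """
--     index_keys = 0
--     index_values = 0
--     for i in range(len(update_html_code)):
--         if " labels: %%COUNTRIES_KEYS%%" in update_html_code[i]:
--             index_keys = i
--         if "data: %%COUNTRIES_VALUES%%" in update_html_code[i]:
--             index_values = i
--     return index_keys, index_values
-- ===== SOURCE B (Python) =====
-- def indexs_countries(update_html_code):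
--     # Back-to-front scan: the first hit from the end is the last forward occurrence.
--     index_keys = 0
--     index_values = 0
--     found_keys = False
--     found_values = False
--     for i in range(len(update_html_code) - 1, -1, -1):
--         if not found_keys and " labels: %%COUNTRIES_KEYS%%" in update_html_code[i]:
--             index_keys = i
--             found_keys = True
--         if not found_values and "data: %%COUNTRIES_VALUES%%" in update_html_code[i]:
--             index_values = i
--             found_values = True
--         if found_keys and found_values:
--             break
--     return index_keys, index_values
-- ===== Notes on version B (the rewrite author's own statement) =====
-- stated objective: alternative
-- what changed: B scans the lines back-to-front with found-flags and breaks as soon as both markers were seen, so each index records the first hit from the end (= last forward occurrence) instead of A's overwrite-everything forward sweep.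
import Mathlib
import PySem

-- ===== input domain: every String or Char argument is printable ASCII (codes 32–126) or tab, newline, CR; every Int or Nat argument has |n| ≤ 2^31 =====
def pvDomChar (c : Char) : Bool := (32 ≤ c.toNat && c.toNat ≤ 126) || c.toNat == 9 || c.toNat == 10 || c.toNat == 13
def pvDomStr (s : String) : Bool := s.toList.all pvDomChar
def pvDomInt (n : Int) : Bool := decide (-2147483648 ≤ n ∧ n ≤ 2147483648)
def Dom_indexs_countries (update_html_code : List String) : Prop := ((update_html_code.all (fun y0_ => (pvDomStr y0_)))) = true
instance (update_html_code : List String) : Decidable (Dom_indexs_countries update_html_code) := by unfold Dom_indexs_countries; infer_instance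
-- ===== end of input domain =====

-- B replaces A's forward overwrite-every-hit sweep by a back-to-front scan with found-flags
-- that stops as soon as both markers have been seen (objective: alternative decomposition).

-- ===== PORT A =====
-- loop body of A: both membership tests on line i, each overwriting its index on a hit
def stepA (update_html_code : List String) (st : Int × Int) (i : Int) : Int × Int :=
  let line := PySem.List.pyGetD update_html_code i ""
  let st1 := if PySem.Str.isIn " labels: %%COUNTRIES_KEYS%%" line then (i, st.2) else st
  if PySem.Str.isIn "data: %%COUNTRIES_VALUES%%" line then (st1.1, i) else st1

def indexs_countries (update_html_code : List String) : Int × Int :=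
  (PySem.List.pyRange 0 (update_html_code.length : Int) 1).foldl (stepA update_html_code) (0, 0)

-- ===== PORT B =====
-- B's loop over the countdown indices, with found-flags and the early break
def indexsAltGo (update_html_code : List String) :
    List Int → Bool → Bool → Int → Int → Int × Int
  | [], _, _, ik, iv => (ik, iv)
  | i :: rest, fk, fv, ik, iv =>
    let line := PySem.List.pyGetD update_html_code i ""
    let p := if !fk && PySem.Str.isIn " labels: %%COUNTRIES_KEYS%%" line then (true, i) else (fk, ik)
    let q := if !fv && PySem.Str.isIn "data: %%COUNTRIES_VALUES%%" line then (true, i) else (fv, iv)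
    if p.1 && q.1 then (p.2, q.2)
    else indexsAltGo update_html_code rest p.1 q.1 p.2 q.2

def indexs_countries_alt (update_html_code : List String) : Int × Int :=
  indexsAltGo update_html_code
    (PySem.List.pyRange ((update_html_code.length : Int) - 1) (-1) (-1)) false false 0 0

-- ===== PRECONDITION & SPEC =====
def Spec_indexs_countries (update_html_code : List String) (out : Int × Int) : Prop := out = indexs_countries_alt update_html_code
instance (update_html_code : List String) (out : Int × Int) : Decidable (Spec_indexs_countries update_html_code out) := by unfold Spec_indexs_countries; infer_instance

-- ===== CLAIM (what is proved, stated in full; the proofs are below) =====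
def Claim_equal_indexs_countries : Prop := ∀ (update_html_code : List String), Dom_indexs_countries update_html_code → Spec_indexs_countries update_html_code (indexs_countries update_html_code)

-- ===== LEMMAS AND PROOFS =====

theorem stepA_fst (u : List String) (st : Int × Int) (i : Int) :
    (stepA u st i).1 =
      if PySem.Str.isIn " labels: %%COUNTRIES_KEYS%%" (PySem.List.pyGetD u i "") then i
      else st.1 := by
  simp only [stepA]
  split_ifs <;> rfl

theorem stepA_snd (u : List String) (st : Int × Int) (i : Int) :
    (stepA u st i).2 =
      if PySem.Str.isIn "data: %%COUNTRIES_VALUES%%" (PySem.List.pyGetD u i "") then i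
      else st.2 := by
  simp only [stepA]
  split_ifs <;> rfl

-- the back-to-front flagged scan computes, per component, the flagged value if already
-- found, else the result of A's forward fold over the reversed index list
theorem indexsAltGo_eq (u : List String) (M : List Int) :
    ∀ (fk fv : Bool) (ik iv : Int),
      (fk = false → ik = 0) → (fv = false → iv = 0) →
      indexsAltGo u M fk fv ik iv =
        ((if fk then ik else (M.reverse.foldl (stepA u) (0, 0)).1),
         (if fv then iv else (M.reverse.foldl (stepA u) (0, 0)).2)) := by
  induction M with
  | nil =>
    intro fk fv ik iv hk hv
    cases fk <;> cases fv <;> simp_all [indexsAltGo]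
  | cons i M' ih =>
    intro fk fv ik iv hk hv
    simp only [indexsAltGo, List.reverse_cons, List.foldl_append, List.foldl_cons,
      List.foldl_nil, stepA_fst, stepA_snd]
    by_cases c1 : PySem.Str.isIn " labels: %%COUNTRIES_KEYS%%" (PySem.List.pyGetD u i "") <;>
      by_cases c2 : PySem.Str.isIn "data: %%COUNTRIES_VALUES%%" (PySem.List.pyGetD u i "") <;>
      cases fk <;> cases fv <;>
      simp_all

-- ===== VERDICT (by name: the statement is the Claim_ definition above) =====
theorem indexs_countries_spec : Claim_equal_indexs_countries := by
  intro u _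
  unfold Spec_indexs_countries indexs_countries indexs_countries_alt
  rw [PySem.List.pyRange_neg_one_eq_reverse]
  have h : ((-1 : Int) + 1) = 0 := by norm_num
  have h2 : ((u.length : Int) - 1 + 1) = (u.length : Int) := by ring
  rw [h, h2, indexsAltGo_eq u _ false false 0 0 (fun _ => rfl) (fun _ => rfl)]
  simp
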